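-- pv_equiv track=rewrite | github.com/pypi-data/pypi-mirror-368 | packages/pyidverify/pyidverify-0.0.1a0.tar.gz/pyidverify-0.0.1a0/pyidverify/validators/government/passport.py | _validate_uk_check_digit
-- ===== SOURCE A (Python) =====
-- def _validate_uk_check_digit(passport_number: str) -> bool:
--     """Validate UK passport check digit."""
--     if len(passport_number) != 9 or not passport_number.isdigit():
--         return False
--
--     try:
--         # UK uses a weighted sum algorithm
--         digits = [int(d) for d in passport_number[:8]]
--         weights = [8, 7, 6, 5, 4, 3, 2, 1]
--
--         total = sum(digit * weight for digit, weight in zip(digits, weights))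
--         check_digit = total % 11
--
--         if check_digit == 10:
--             check_digit = 0
--
--         return check_digit == int(passport_number[8])
--
--     except (ValueError, IndexError):
--         return False
-- ===== SOURCE B (Python) =====
-- def _validate_uk_check_digit(passport_number: str) -> bool:
--     if len(passport_number) != 9 or not passport_number.isdigit():
--         return False
--     # weights 8..1 are suffix counts, so the weighted sum equals the sum of prefix sums
--     running = 0
--     total = 0
--     for ch in passport_number[:8]:
--         running += int(ch)
--         total += running
--     check_digit = total % 11
--     if check_digit == 10:
--         check_digit = 0
--     return check_digit == int(passport_number[8])
-- ===== Notes on version B (the rewrite author's own statement) =====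
-- stated objective: alternative
-- what changed: Replaces the weights list plus zip/comprehension weighted sum with a single prefix-sum loop (running cumulative digit sum added into total), exploiting that weight 8-i equals the number of positions from i onward; no weights array is built or indexed.
import Mathlib
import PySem

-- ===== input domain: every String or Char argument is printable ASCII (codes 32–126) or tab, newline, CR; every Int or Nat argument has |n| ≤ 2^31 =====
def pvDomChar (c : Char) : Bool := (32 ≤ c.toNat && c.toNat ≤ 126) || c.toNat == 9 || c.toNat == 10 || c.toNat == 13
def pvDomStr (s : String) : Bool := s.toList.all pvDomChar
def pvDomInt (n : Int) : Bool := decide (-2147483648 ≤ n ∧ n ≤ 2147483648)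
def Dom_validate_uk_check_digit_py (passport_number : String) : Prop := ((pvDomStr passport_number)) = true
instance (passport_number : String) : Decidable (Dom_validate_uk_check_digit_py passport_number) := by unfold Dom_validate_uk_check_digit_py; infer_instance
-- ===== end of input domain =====

-- B replaces the weights list and zipped weighted sum by one prefix-sum accumulator loop (alternative decomposition, same cost).

-- int(c) for a single digit character; exact here because the guard ensures isdigit
def pvDigit (c : Char) : Int := (c.toNat : Int) - 48

-- ===== PORT A =====
def validate_uk_check_digit_py (passport_number : String) : Bool :=
  if PySem.Str.len passport_number ≠ 9 ∨ ¬ PySem.Str.strIsdigit passport_number then false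
  else
    let digits := (PySem.List.slice passport_number.toList none (some 8)).map pvDigit
    let weights : List Int := [8, 7, 6, 5, 4, 3, 2, 1]
    let total := ((digits.zip weights).map (fun p => p.1 * p.2)).sum
    let check_digit := PySem.Int.mod total 11
    let check_digit := if check_digit = 10 then (0 : Int) else check_digit
    match PySem.List.pyGet? passport_number.toList 8 with
    | some c => decide (check_digit = pvDigit c)
    | none => false   -- except IndexError → False (unreachable: length is 9)

-- ===== PORT B =====
def validate_uk_check_digit_py_alt (passport_number : String) : Bool :=
  if PySem.Str.len passport_number ≠ 9 ∨ ¬ PySem.Str.strIsdigit passport_number then false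
  else
    -- for ch in passport_number[:8]: running += int(ch); total += running
    let rt := (PySem.List.slice passport_number.toList none (some 8)).foldl
      (fun (rt : Int × Int) c => (rt.1 + pvDigit c, rt.2 + (rt.1 + pvDigit c))) (0, 0)
    let check_digit := PySem.Int.mod rt.2 11
    let check_digit := if check_digit = 10 then (0 : Int) else check_digit
    match PySem.List.pyGet? passport_number.toList 8 with
    | some c => decide (check_digit = pvDigit c)
    | none => false

-- ===== PRECONDITION & SPEC =====
def Spec_validate_uk_check_digit_py (passport_number : String) (out : Bool) : Prop := out = validate_uk_check_digit_py_alt passport_number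
instance (passport_number : String) (out : Bool) : Decidable (Spec_validate_uk_check_digit_py passport_number out) := by unfold Spec_validate_uk_check_digit_py; infer_instance

-- ===== CLAIM (what is proved, stated in full; the proofs are below) =====
def Claim_equal_validate_uk_check_digit_py : Prop := ∀ (passport_number : String), Dom_validate_uk_check_digit_py passport_number → Spec_validate_uk_check_digit_py passport_number (validate_uk_check_digit_py passport_number)

-- ===== LEMMAS AND PROOFS =====

-- ===== VERDICT (by name: the statement is the Claim_ definition above) =====
theorem validate_uk_check_digit_py_spec : Claim_equal_validate_uk_check_digit_py := by
  intro s _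
  unfold Spec_validate_uk_check_digit_py validate_uk_check_digit_py validate_uk_check_digit_py_alt
  by_cases h : PySem.Str.len s ≠ 9 ∨ ¬ PySem.Str.strIsdigit s
  · rw [if_pos h, if_pos h]
  · rw [if_neg h, if_neg h]
    push Not at h
    have h9 : s.toList.length = 9 := by
      have := h.1
      simp [PySem.Str.len_eq] at this
      exact_mod_cast this
    generalize hL : s.toList = L at h9 ⊢
    rcases L with _ | ⟨a, _ | ⟨b, _ | ⟨c, _ | ⟨d, _ | ⟨e, _ | ⟨f, _ | ⟨g, _ | ⟨h8, _ | ⟨i, _ | ⟨j, t⟩⟩⟩⟩⟩⟩⟩⟩⟩⟩ <;>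
      simp_all [PySem.List.slice, PySem.List.pyGet?, PySem.List.pyIdx?]
    ring_nf
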